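-- pv_equiv track=rewrite | github.com/g-s01/data-programming-btp | gautam-results-and-analysis/raw-to-fine-direct/through-lfs/context-window-one/lfs_for_raw_sentence_gpt.py | label_sentence_Product_Drink
-- ===== SOURCE A (Python) =====
-- ABSTAIN = -1
--
-- Product_Drink = 29
--
-- def label_sentence_Product_Drink(tokens):
--     """
--     Labels each token in a sentence as Product_Drink if it indicates a type of drink or beverage.
--     Returns ABSTAIN for tokens that do not match the category.
--
--     Args:
--     tokens: list of str - A list of words representing a sentence.
--
--     Returns:
--     list of str - A list of labels for each token.
--     """
--     # Common drink-related indicators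
--     drink_indicators = {
--         'water', 'prosecco', 'coca-cola', 'apfelkorn', 'liqueur', 'coffee', 'milk', 'wine',
--         'postum', 'beverage', 'juice', 'tea', 'soda', 'cider', 'beer', 'cocktail', 'spirit',
--         'champagne', 'smoothie', 'latte', 'espresso', 'mocha', 'tonic', 'lemonade', 'milkshake',
--         'whiskey', 'vodka', 'rum', 'gin', 'brandy', 'liqueur', 'sake', 'kombucha', 'matcha',
--         'chai', 'herbal', 'infusion', 'alcoholic', 'punch'
--     }
--     product_context = {
--         'served', 'drank', 'consumed', 'beverage', 'drink', 'poured', 'accompanied', 'with',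
--         'glass', 'shot', 'cup', 'bottle', 'flask', 'tumbler', 'refreshing', 'sweetened'
--     }
--
--     labels = []
--
--     for i, token in enumerate(tokens):
--         token_lower = token.lower()
--
--         # Check if the token or surrounding tokens suggest a drink
--         if (
--             token_lower in drink_indicators and (  # The token itself indicates a drink
--             (i > 0 and tokens[i - 1].lower() in drink_indicators) or  # Preceded by a drink indicator
--             (i < len(tokens) - 1 and tokens[i + 1].lower() in drink_indicators) or  # Followed by a drink indicator
--             (i > 0 and tokens[i - 1].lower() in product_context) or  # Preceded by a drink context keyword
--             (i < len(tokens) - 1 and tokens[i + 1].lower() in product_context))  # Followed by a drink context keyword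
--         ):
--             labels.append(Product_Drink)
--         else:
--             labels.append(ABSTAIN)  # Default to 'O' if no match is found
--
--     return labels
-- ===== SOURCE B (Python) =====
-- ABSTAIN = -1
--
-- Product_Drink = 29
--
-- def label_sentence_Product_Drink(tokens):
--     drink_indicators = {
--         'water', 'prosecco', 'coca-cola', 'apfelkorn', 'liqueur', 'coffee', 'milk', 'wine',
--         'postum', 'beverage', 'juice', 'tea', 'soda', 'cider', 'beer', 'cocktail', 'spirit',
--         'champagne', 'smoothie', 'latte', 'espresso', 'mocha', 'tonic', 'lemonade', 'milkshake',
--         'whiskey', 'vodka', 'rum', 'gin', 'brandy', 'sake', 'kombucha', 'matcha',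
--         'chai', 'herbal', 'infusion', 'alcoholic', 'punch'
--     }
--     product_context = {
--         'served', 'drank', 'consumed', 'beverage', 'drink', 'poured', 'accompanied', 'with',
--         'glass', 'shot', 'cup', 'bottle', 'flask', 'tumbler', 'refreshing', 'sweetened'
--     }
--     # Streaming pass over adjacent pairs: carry whether the previous token was a
--     # drink/context word, peek only at the immediate next token; no indexing.
--     labels = []
--     prev_nb = False
--     for cur, nxt in zip(tokens, tokens[1:]):
--         c = cur.lower()
--         nl = nxt.lower()
--         if c in drink_indicators and (prev_nb or nl in drink_indicators or nl in product_context):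
--             labels.append(Product_Drink)
--         else:
--             labels.append(ABSTAIN)
--         prev_nb = c in drink_indicators or c in product_context
--     # the last token has no successor: only its left neighbour can justify it
--     if tokens:
--         c = tokens[-1].lower()
--         labels.append(Product_Drink if c in drink_indicators and prev_nb else ABSTAIN)
--     return labels
-- ===== Notes on version B (the rewrite author's own statement) =====
-- stated objective: alternative
-- what changed: Replaces A's index-based loop (random access tokens[i-1]/tokens[i+1] with four separate membership disjuncts per position) with a streaming pass over zip(tokens, tokens[1:]) that carries a single 'previous token was a drink/context word' flag and peeks one token ahead, labelling the last token in a separate final step; no indexing at all.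
import Mathlib
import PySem

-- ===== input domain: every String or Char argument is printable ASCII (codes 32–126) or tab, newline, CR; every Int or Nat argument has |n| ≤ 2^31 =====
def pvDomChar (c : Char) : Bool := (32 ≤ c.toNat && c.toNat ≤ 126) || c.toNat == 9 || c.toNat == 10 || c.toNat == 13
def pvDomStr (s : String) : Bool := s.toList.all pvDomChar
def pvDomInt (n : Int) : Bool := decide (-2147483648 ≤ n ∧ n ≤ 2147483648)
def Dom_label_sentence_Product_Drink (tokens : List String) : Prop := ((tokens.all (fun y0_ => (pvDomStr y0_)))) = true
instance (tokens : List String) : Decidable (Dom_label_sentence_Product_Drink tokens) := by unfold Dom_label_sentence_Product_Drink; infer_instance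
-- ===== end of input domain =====

-- B replaces A's index-based loop by a streaming pass over adjacent pairs carrying a
-- previous-neighbor flag, with a separate final step for the last token (alternative decomposition, same cost).


-- ===== PORT A =====
-- the two literal word sets (Python sets of string literals; membership = list membership)
def pvDrinkWords : List String :=
  ["water", "prosecco", "coca-cola", "apfelkorn", "liqueur", "coffee", "milk", "wine",
   "postum", "beverage", "juice", "tea", "soda", "cider", "beer", "cocktail", "spirit",
   "champagne", "smoothie", "latte", "espresso", "mocha", "tonic", "lemonade", "milkshake",
   "whiskey", "vodka", "rum", "gin", "brandy", "sake", "kombucha", "matcha",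
   "chai", "herbal", "infusion", "alcoholic", "punch"]

def pvCtxWords : List String :=
  ["served", "drank", "consumed", "beverage", "drink", "poured", "accompanied", "with",
   "glass", "shot", "cup", "bottle", "flask", "tumbler", "refreshing", "sweetened"]

-- tokens[j].lower() in ws  (j guarded in range by the caller's short-circuit, so getD is never the default)
def pvMemLowerAt (ws : List String) (tokens : List String) (j : Int) : Bool :=
  ws.contains (PySem.Str.lower ((PySem.List.pyGet? tokens j).getD ""))

def label_sentence_Product_Drink (tokens : List String) : List Int :=
  (PySem.List.enumerate tokens 0).foldl
    (fun labels it =>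
      let i := it.1
      let token := it.2
      let tokenLower := PySem.Str.lower token
      if pvDrinkWords.contains tokenLower &&
           ((decide (0 < i) && pvMemLowerAt pvDrinkWords tokens (i - 1)) ||
            (decide (i < (tokens.length : Int) - 1) && pvMemLowerAt pvDrinkWords tokens (i + 1)) ||
            (decide (0 < i) && pvMemLowerAt pvCtxWords tokens (i - 1)) ||
            (decide (i < (tokens.length : Int) - 1) && pvMemLowerAt pvCtxWords tokens (i + 1)))
      then labels ++ [(29 : Int)]
      else labels ++ [(-1 : Int)]) []

-- ===== PORT B =====
-- the loop body of Source B: state = (labels so far, prev_nb); pair = (cur, nxt)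
def pvStep (st : List Int × Bool) (p : String × String) : List Int × Bool :=
  let c := PySem.Str.lower p.1
  let nl := PySem.Str.lower p.2
  let labels :=
    if pvDrinkWords.contains c &&
         (st.2 || pvDrinkWords.contains nl || pvCtxWords.contains nl)
    then st.1 ++ [(29 : Int)] else st.1 ++ [(-1 : Int)]
  (labels, pvDrinkWords.contains c || pvCtxWords.contains c)

def label_sentence_Product_Drink_alt (tokens : List String) : List Int :=
  -- for cur, nxt in zip(tokens, tokens[1:]): …
  let st := (tokens.zip (PySem.List.slice tokens (some 1) none)).foldl pvStep ([], false)
  if tokens.isEmpty then st.1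
  else
    -- if tokens: label the last token from the carried prev_nb flag alone
    let c := PySem.Str.lower ((PySem.List.pyGet? tokens (-1)).getD "")
    st.1 ++ [if pvDrinkWords.contains c && st.2 then (29 : Int) else (-1 : Int)]

-- ===== PRECONDITION & SPEC =====
def Spec_label_sentence_Product_Drink (tokens : List String) (out : List Int) : Prop := out = label_sentence_Product_Drink_alt tokens
instance (tokens : List String) (out : List Int) : Decidable (Spec_label_sentence_Product_Drink tokens out) := by unfold Spec_label_sentence_Product_Drink; infer_instance

-- ===== CLAIM (what is proved, stated in full; the proofs are below) =====
def Claim_equal_label_sentence_Product_Drink : Prop := ∀ (tokens : List String), Dom_label_sentence_Product_Drink tokens → Spec_label_sentence_Product_Drink tokens (label_sentence_Product_Drink tokens)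

-- ===== LEMMAS AND PROOFS =====

-- neighbor flag: the merged drink-or-context membership
def pvNb (t : String) : Bool := pvDrinkWords.contains t || pvCtxWords.contains t

-- reference: structural recursion with a carried previous-neighbor flag
def pvGo (prev : Bool) : List String → List Int
  | [] => []
  | [t] => [if pvDrinkWords.contains (PySem.Str.lower t) && prev then (29 : Int) else -1]
  | t :: u :: rest =>
      (if pvDrinkWords.contains (PySem.Str.lower t) &&
          (prev || pvNb (PySem.Str.lower u)) then (29 : Int) else -1)
        :: pvGo (pvNb (PySem.Str.lower t)) (u :: rest)

theorem pvGo_length : ∀ (ts : List String) (prev : Bool), (pvGo prev ts).length = ts.length := by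
  intro ts
  induction ts with
  | nil => intro prev; rfl
  | cons t rest ih =>
    intro prev
    cases rest with
    | nil => rfl
    | cons u rest' => simp [pvGo, ih]

-- B's fold with the final step equals the reference recursion (generalized state)
theorem pvB_fold : ∀ (ts : List String) (prev : Bool) (acc : List Int), ts ≠ [] →
    (fun st : List Int × Bool =>
        st.1 ++ [if pvDrinkWords.contains (PySem.Str.lower (ts.getLast?.getD "")) && st.2
                 then (29 : Int) else -1])
      ((ts.zip ts.tail).foldl pvStep (acc, prev)) = acc ++ pvGo prev ts := by
  intro ts
  induction ts with
  | nil => intro _ _ h; exact absurd rfl h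
  | cons t rest ih =>
    intro prev acc _
    cases rest with
    | nil => simp [pvGo]
    | cons u rest' =>
      have hz : ((t :: u :: rest').zip (t :: u :: rest').tail)
          = (t, u) :: ((u :: rest').zip (u :: rest').tail) := by simp
      rw [hz, List.foldl_cons]
      have hsnd : (pvStep (acc, prev) (t, u)).2
          = (pvDrinkWords.contains (PySem.Str.lower t) || pvCtxWords.contains (PySem.Str.lower t)) := rfl
      have hfst : (pvStep (acc, prev) (t, u)).1
          = acc ++ [if pvDrinkWords.contains (PySem.Str.lower t) &&
              (prev || pvNb (PySem.Str.lower u)) then (29 : Int) else -1] := by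
        show (if pvDrinkWords.contains (PySem.Str.lower t) &&
              (prev || pvDrinkWords.contains (PySem.Str.lower u) || pvCtxWords.contains (PySem.Str.lower u))
            then acc ++ [(29 : Int)] else acc ++ [-1]) = _
        have hcond : (prev || pvDrinkWords.contains (PySem.Str.lower u) || pvCtxWords.contains (PySem.Str.lower u))
            = (prev || pvNb (PySem.Str.lower u)) := by
          simp [pvNb, Bool.or_assoc]
        rw [hcond]
        split_ifs <;> rfl
      have hst : pvStep (acc, prev) (t, u)
          = ((pvStep (acc, prev) (t, u)).1,
             pvDrinkWords.contains (PySem.Str.lower t) || pvCtxWords.contains (PySem.Str.lower t)) := by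
        rw [← hsnd]
      have := ih (pvDrinkWords.contains (PySem.Str.lower t) || pvCtxWords.contains (PySem.Str.lower t))
        ((pvStep (acc, prev) (t, u)).1) (by simp)
      simp only [List.getLast?_cons_cons] at *
      rw [hst, this, hfst]
      simp only [pvGo, pvNb, List.append_assoc, List.singleton_append]

theorem pvB_eq (tokens : List String) :
    label_sentence_Product_Drink_alt tokens = pvGo false tokens := by
  cases tokens with
  | nil => rfl
  | cons t rest =>
    have h := pvB_fold (t :: rest) false [] (by simp)
    simp only [label_sentence_Product_Drink_alt, PySem.List.slice_from_one,
      List.isEmpty_cons, Bool.false_eq_true, if_false, PySem.List.pyGet?_neg_one,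
      List.nil_append] at *
    exact h

-- per-position characterization of the reference recursion
theorem pvGo_getD : ∀ (ts : List String) (prev : Bool) (i : Nat), i < ts.length →
    (pvGo prev ts).getD i 0 =
      if pvDrinkWords.contains (PySem.Str.lower (ts.getD i "")) &&
         ((if i = 0 then prev else pvNb (PySem.Str.lower (ts.getD (i - 1) ""))) ||
          (decide (i + 1 < ts.length) && pvNb (PySem.Str.lower (ts.getD (i + 1) ""))))
      then 29 else -1 := by
  intro ts
  induction ts with
  | nil => intro prev i h; simp at h
  | cons t rest ih =>
    intro prev i h
    cases rest with
    | nil =>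
      have h0 : i = 0 := by simpa using h
      subst h0
      simp [pvGo]
    | cons u rest' =>
      cases i with
      | zero => simp [pvGo]
      | succ j =>
        have hj : j < (u :: rest').length := by simpa using h
        have := ih (pvNb (PySem.Str.lower t)) j hj
        simp only [pvGo, List.getD_cons_succ, this]
        cases j with
        | zero => simp
        | succ k =>
          simp only [Nat.succ_ne_zero, if_false, Nat.add_sub_cancel, List.getD_cons_succ]
          have h1 : decide (k + 1 + 1 < (u :: rest').length)
              = decide (k + 1 + 1 + 1 < (t :: u :: rest').length) := by
            simp only [List.length_cons]; rw [decide_eq_decide]; omega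
          rw [h1]

-- A's per-token condition, factored out (definitionally the fold body's test)
def pvCondA (tokens : List String) (i : Int) (token : String) : Bool :=
  pvDrinkWords.contains (PySem.Str.lower token) &&
    ((decide (0 < i) && pvMemLowerAt pvDrinkWords tokens (i - 1)) ||
     (decide (i < (tokens.length : Int) - 1) && pvMemLowerAt pvDrinkWords tokens (i + 1)) ||
     (decide (0 < i) && pvMemLowerAt pvCtxWords tokens (i - 1)) ||
     (decide (i < (tokens.length : Int) - 1) && pvMemLowerAt pvCtxWords tokens (i + 1)))

-- the merged neighbor flag equals the pair of A's disjuncts, guard by guard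
theorem pv_bridge (a p q b c d e B1 B2 : Bool)
    (hb : p = true → (b || d) = B1) (hc : q = true → (c || e) = B2) :
    (a && ((p && b) || (q && c) || (p && d) || (q && e))) = (a && ((p && B1) || (q && B2))) := by
  cases p <;> cases q <;> simp_all
  cases b <;> cases c <;> cases d <;> cases e <;> simp_all

theorem pv_lookup (tokens : List String) (j : Nat) (hj : j < tokens.length) (ws : List String) :
    pvMemLowerAt ws tokens ((j : Int)) = ws.contains (PySem.Str.lower (tokens.getD j "")) := by
  unfold pvMemLowerAt
  rw [PySem.List.pyGet?_natCast, List.getElem?_eq_getElem hj, Option.getD_some,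
      List.getD_eq_getElem tokens "" hj]

theorem pv_point (tokens : List String) (i : Nat) (h : i < tokens.length) :
    (if pvCondA tokens (0 + (i : Int)) ((tokens.getD i "")) then (29 : Int) else (-1 : Int)) =
      (if pvDrinkWords.contains (PySem.Str.lower (tokens.getD i "")) &&
          ((if i = 0 then false else pvNb (PySem.Str.lower (tokens.getD (i - 1) ""))) ||
           (decide (i + 1 < tokens.length) && pvNb (PySem.Str.lower (tokens.getD (i + 1) ""))))
       then (29 : Int) else (-1 : Int)) := by
  have hB : pvCondA tokens (0 + (i : Int)) (tokens.getD i "") =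
      (pvDrinkWords.contains (PySem.Str.lower (tokens.getD i "")) &&
        ((if i = 0 then false else pvNb (PySem.Str.lower (tokens.getD (i - 1) ""))) ||
         (decide (i + 1 < tokens.length) && pvNb (PySem.Str.lower (tokens.getD (i + 1) ""))))) := ?_
  · rw [hB]
  unfold pvCondA
  have hp : decide (0 < 0 + (i : Int)) = decide (0 < i) := by rw [decide_eq_decide]; omega
  have hq : decide (0 + (i : Int) < (tokens.length : Int) - 1) = decide (i + 1 < tokens.length) := by
    rw [decide_eq_decide]; omega
  rw [hp, hq]
  have hifd : (if i = 0 then false else pvNb (PySem.Str.lower (tokens.getD (i - 1) "")))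
      = (decide (0 < i) && pvNb (PySem.Str.lower (tokens.getD (i - 1) ""))) := by
    rcases Nat.eq_zero_or_pos i with h0 | h0
    · simp [h0]
    · simp [Nat.pos_iff_ne_zero.mp h0, h0]
  rw [hifd]
  refine pv_bridge _ _ _ _ _ _ _ _ _ ?_ ?_
  · intro hp1
    have h1 : 0 < i := of_decide_eq_true hp1
    have e1 : (0 + (i : Int)) - 1 = ((i - 1 : Nat) : Int) := by omega
    rw [e1, pv_lookup tokens (i - 1) (by omega), pv_lookup tokens (i - 1) (by omega)]
    rfl
  · intro hq1
    have h2 : i + 1 < tokens.length := of_decide_eq_true hq1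
    have e2 : (0 + (i : Int)) + 1 = ((i + 1 : Nat) : Int) := by omega
    rw [e2, pv_lookup tokens (i + 1) h2, pv_lookup tokens (i + 1) h2]
    rfl

theorem pv_main (tokens : List String) :
    label_sentence_Product_Drink tokens = pvGo false tokens := by
  unfold label_sentence_Product_Drink
  have hbody : (fun (labels : List Int) (it : Int × String) =>
        if pvCondA tokens it.1 it.2 then labels ++ [(29 : Int)] else labels ++ [(-1 : Int)])
      = fun labels it => labels ++ [if pvCondA tokens it.1 it.2 then (29 : Int) else (-1 : Int)] := by
    funext labels it; by_cases hc : pvCondA tokens it.1 it.2 <;> simp [hc]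
  show (PySem.List.enumerate tokens 0).foldl
      (fun labels it => if pvCondA tokens it.1 it.2 then labels ++ [(29 : Int)] else labels ++ [(-1 : Int)]) [] = _
  rw [hbody, PySem.List.foldl_append_singleton_eq_map, List.nil_append]
  apply List.ext_getElem
  · simp [PySem.List.length_enumerate, pvGo_length]
  · intro i h1 h2
    have hi : i < tokens.length := by simpa [PySem.List.length_enumerate] using h1
    have hlen : i < (pvGo false tokens).length := h2
    simp only [List.getElem_map, PySem.List.getElem_enumerate]
    rw [← List.getD_eq_getElem (pvGo false tokens) 0 hlen, pvGo_getD tokens false i hi,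
        ← List.getD_eq_getElem tokens "" hi]
    exact pv_point tokens i hi

-- ===== VERDICT (by name: the statement is the Claim_ definition above) =====
theorem label_sentence_Product_Drink_spec : Claim_equal_label_sentence_Product_Drink := by
  intro tokens _
  show _ = _
  rw [pv_main, pvB_eq]
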